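-- pv_equiv track=rewrite | github.com/Seekr-Technologies/seekr-chain | src/seekr_chain/tar_directory.py | _path_boundary_match
-- ===== SOURCE A (Python) =====
-- def _path_boundary_match(relpath: str, needle: str) -> bool:
--     """
--     True if `needle` occurs in relpath at a path boundary, and matches either:
--       - the exact path, or
--       - a prefix of relpath (i.e. relpath is under that directory)
--     `relpath` and `needle` are expected to start with '/'.
--     """
--     if not needle.startswith("/"):
--         raise ValueError("needle must start with '/'")
--     if not relpath.startswith("/"):
--         raise ValueError("relpath must start with '/'")
--
--     # Fast path: anchored prefix match
--     if relpath == needle or relpath.startswith(needle + "/"):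
--         return True
--
--     # Unanchored: find needle in relpath at a boundary, and ensure it's a whole path component sequence.
--     # Example: needle="/src" matches "/a/src" and "/a/src/file", but not "/a/src2".
--     start = 0
--     while True:
--         idx = relpath.find(needle, start)
--         if idx == -1:
--             return False
--
--         # Left boundary: must be at start or preceded by '/'
--         if idx != 0 and relpath[idx - 1] != "/":
--             start = idx + 1
--             continue
--
--         # Right boundary: must be end or followed by '/'
--         end_idx = idx + len(needle)
--         if end_idx == len(relpath) or relpath[end_idx] == "/":
--             return True
--
--         start = idx + 1
-- ===== SOURCE B (Python) =====
-- def _path_boundary_match(relpath: str, needle: str) -> bool: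
--     if not needle.startswith("/"):
--         raise ValueError("needle must start with '/'")
--     if not relpath.startswith("/"):
--         raise ValueError("relpath must start with '/'")
--     comps = relpath.split("/")
--     nc = needle.split("/")
--     n = len(nc)
--     return any(comps[j:j + n] == nc for j in range(len(comps) - n + 1))
-- ===== Notes on version B (the rewrite author's own statement) =====
-- stated objective: alternative
-- what changed: Replaces A's character-level find-loop with boundary checks by splitting both paths on '/' into component lists and testing whether needle's component list occurs as a contiguous sublist of relpath's component list.
import Mathlib
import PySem

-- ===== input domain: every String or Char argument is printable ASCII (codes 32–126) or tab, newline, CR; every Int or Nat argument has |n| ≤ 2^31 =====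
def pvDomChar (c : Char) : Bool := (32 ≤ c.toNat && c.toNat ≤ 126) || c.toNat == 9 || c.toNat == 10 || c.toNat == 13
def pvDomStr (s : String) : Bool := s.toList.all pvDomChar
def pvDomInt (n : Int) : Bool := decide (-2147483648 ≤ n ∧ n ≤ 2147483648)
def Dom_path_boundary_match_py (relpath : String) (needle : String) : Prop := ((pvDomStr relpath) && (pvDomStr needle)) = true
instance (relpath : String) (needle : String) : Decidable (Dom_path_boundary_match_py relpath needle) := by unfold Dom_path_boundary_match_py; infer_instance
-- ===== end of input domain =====

-- B replaces A's character-level find-loop with boundary checks by splitting both paths on '/' and testing component-list containment (alternative algorithm, similar cost).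

-- ===== PORT A =====
-- A's while-True loop over relpath.find(needle, start); 'fuel' is only a totality guard (the loop terminates in ≤ len+1 steps).
def pathFindLoop (r nd : List Char) (fuel start : Nat) : Bool :=
  match fuel with
  | 0 => false
  | fuel + 1 =>
    if PySem.Chars.findFrom r nd (start : Int) none = -1 then false
    else
      if (PySem.Chars.findFrom r nd (start : Int) none).toNat ≠ 0 ∧
         ¬ (r[(PySem.Chars.findFrom r nd (start : Int) none).toNat - 1]? = some '/') then
        pathFindLoop r nd fuel ((PySem.Chars.findFrom r nd (start : Int) none).toNat + 1)
      else if (PySem.Chars.findFrom r nd (start : Int) none).toNat + nd.length = r.length ∨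
              r[(PySem.Chars.findFrom r nd (start : Int) none).toNat + nd.length]? = some '/' then
        true
      else pathFindLoop r nd fuel ((PySem.Chars.findFrom r nd (start : Int) none).toNat + 1)

-- Python raises ValueError on the two leading guards; the port returns false there (those inputs are outside Pre_).
def path_boundary_match_py (relpath : String) (needle : String) : Bool :=
  if ¬ PySem.Str.startswith needle "/" then false
  else if ¬ PySem.Str.startswith relpath "/" then false
  else if relpath.toList = needle.toList ||
          PySem.Chars.startswith relpath.toList (needle.toList ++ ['/']) then true
  else pathFindLoop relpath.toList needle.toList (relpath.toList.length + 1) 0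

-- ===== PORT B =====
-- split both on '/', then test whether needle's component list is a contiguous sublist of relpath's
def path_boundary_match_py_alt (relpath : String) (needle : String) : Bool :=
  if ¬ PySem.Str.startswith needle "/" then false
  else if ¬ PySem.Str.startswith relpath "/" then false
  else
    let comps := PySem.Chars.splitOn relpath.toList ['/']
    let nc := PySem.Chars.splitOn needle.toList ['/']
    let n := nc.length
    (PySem.List.pyRange 0 ((comps.length : Int) - (n : Int) + 1) 1).any fun j =>
      decide (PySem.List.slice comps (some j) (some (j + (n : Int))) = nc)

-- ===== PRECONDITION & SPEC =====
-- Pre_ excludes exactly the inputs where Python A raises ValueError (needle or relpath not starting with '/'); B raises the same errors there.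
def Pre_path_boundary_match_py (relpath : String) (needle : String) : Prop :=
  PySem.Str.startswith needle "/" = true ∧ PySem.Str.startswith relpath "/" = true
instance (relpath : String) (needle : String) : Decidable (Pre_path_boundary_match_py relpath needle) := by unfold Pre_path_boundary_match_py; infer_instance
def pvWitness_path_boundary_match_py : String × String := ("/a/src/x", "/src")

def Spec_path_boundary_match_py (relpath : String) (needle : String) (out : Bool) : Prop := out = path_boundary_match_py_alt relpath needle
instance (relpath : String) (needle : String) (out : Bool) : Decidable (Spec_path_boundary_match_py relpath needle out) := by unfold Spec_path_boundary_match_py; infer_instance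

-- ===== CLAIM (what is proved, stated in full; the proofs are below) =====
def Claim_equal_path_boundary_match_py : Prop := ∀ (relpath : String) (needle : String), Dom_path_boundary_match_py relpath needle → Pre_path_boundary_match_py relpath needle → Spec_path_boundary_match_py relpath needle (path_boundary_match_py relpath needle)

-- ===== LEMMAS AND PROOFS =====

-- the boundary-match condition both programs decide: needle occurs at i, at a left and right path boundary
def PBCond (r nd : List Char) (i : Nat) : Prop :=
  (i = 0 ∨ r[i - 1]? = some '/') ∧ nd <+: r.drop i ∧
  (i + nd.length = r.length ∨ r[i + nd.length]? = some '/')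

lemma prefix_drop_lt_length {r nd : List Char} {i : Nat} (hnd : nd ≠ []) (h : nd <+: r.drop i) :
    i < r.length := by
  by_contra hle
  have : r.drop i = [] := List.drop_eq_nil_iff.mpr (by omega)
  rw [this] at h
  exact hnd (List.prefix_nil.mp h)

lemma prefix_drop_infix_drop {r nd : List Char} {i k : Nat} (hk : k ≤ i) (h : nd <+: r.drop i) :
    nd <:+: r.drop k := by
  have : r.drop i = (r.drop k).drop (i - k) := by
    rw [List.drop_drop]; congr 1; omega
  rw [this] at h
  exact h.isInfix.trans (List.drop_suffix _ _).isInfix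

-- ===== A-side: the find-loop decides ∃ i, PBCond =====

lemma pathFindLoop_iff (r nd : List Char) (hnd : nd ≠ []) :
    ∀ fuel start, start ≤ r.length → r.length + 1 ≤ fuel + start →
      (pathFindLoop r nd fuel start = true ↔ ∃ i, start ≤ i ∧ PBCond r nd i) := by
  intro fuel
  induction fuel with
  | zero => intro start hs hf; omega
  | succ fuel ih =>
    intro start hs hf
    by_cases hj : PySem.Chars.findFrom r nd (start : Int) none = -1
    · simp only [pathFindLoop]
      rw [if_pos hj]
      simp only [Bool.false_eq_true, false_iff]
      rintro ⟨i, hsi, hc⟩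
      exact (PySem.Chars.findFrom_natCast_eq_neg_one_iff r nd start hs).mp hj
        (prefix_drop_infix_drop hsi hc.2.1)
    · obtain ⟨hsj, hpref, hmin⟩ := PySem.Chars.findFrom_natCast_spec r nd start hs hj
      set j := PySem.Chars.findFrom r nd (start : Int) none with hjdef
      have hj0 : 0 ≤ j := le_trans (Int.natCast_nonneg start) hsj
      set i := j.toNat with hidef
      have hsi : start ≤ i := by omega
      have hilt : i < r.length := prefix_drop_lt_length hnd hpref
      by_cases hleft : i ≠ 0 ∧ ¬ (r[i - 1]? = some '/')
      · simp only [pathFindLoop]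
        rw [if_neg hj, if_pos hleft,
          ih (i + 1) (by omega) (by omega)]
        constructor
        · rintro ⟨i', h1, hc⟩; exact ⟨i', by omega, hc⟩
        · rintro ⟨i', h1, hc⟩
          refine ⟨i', ?_, hc⟩
          rcases Nat.lt_trichotomy i' i with h | h | h
          · exact absurd hc.2.1 (hmin i' h1 h)
          · subst h
            rcases hc.1 with h0 | hsl
            · exact absurd h0 hleft.1
            · exact absurd hsl hleft.2
          · omega
      · by_cases hright : i + nd.length = r.length ∨ r[i + nd.length]? = some '/'
        · simp only [pathFindLoop]
          rw [if_neg hj, if_neg hleft, if_pos hright]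
          refine iff_of_true rfl ⟨i, hsi, ?_, hpref, hright⟩
          rcases Decidable.em (i = 0) with h0 | h0
          · exact Or.inl h0
          · rcases Decidable.em (r[i - 1]? = some '/') with hsl | hsl
            · exact Or.inr hsl
            · exact absurd ⟨h0, hsl⟩ hleft
        · simp only [pathFindLoop]
          rw [if_neg hj, if_neg hleft, if_neg hright,
            ih (i + 1) (by omega) (by omega)]
          constructor
          · rintro ⟨i', h1, hc⟩; exact ⟨i', by omega, hc⟩
          · rintro ⟨i', h1, hc⟩
            refine ⟨i', ?_, hc⟩
            rcases Nat.lt_trichotomy i' i with h | h | h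
            · exact absurd hc.2.1 (hmin i' h1 h)
            · subst h; exact absurd hc.2.2 hright
            · omega

lemma fast_path_cond {r nd : List Char} (h : r = nd ∨ nd ++ ['/'] <+: r) : PBCond r nd 0 := by
  rcases h with h | ⟨t, ht⟩
  · exact ⟨Or.inl rfl, by simp [h], Or.inl (by simp [h])⟩
  · refine ⟨Or.inl rfl, ?_, Or.inr ?_⟩
    · rw [List.drop_zero, ← ht]
      exact ⟨'/' :: t, by simp⟩
    · rw [Nat.zero_add, ← ht, List.append_assoc, List.getElem?_append_right (by simp)]
      simp

-- ===== B-side: splitting on '/' =====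

-- the structural recursion PySem.Chars.splitOn · ['/'] computes
def splitSlash : List Char → List (List Char)
  | [] => [[]]
  | c :: rest => if c = '/' then [] :: splitSlash rest
                 else (c :: (splitSlash rest).headI) :: (splitSlash rest).tail

lemma splitSlash_ne_nil (s : List Char) : splitSlash s ≠ [] := by
  cases s <;> simp [splitSlash] <;> split_ifs <;> simp

lemma go_spec : ∀ (s : List Char) (fuel : Nat) (cur : List Char) (acc : List (List Char)),
    s.length ≤ fuel →
    PySem.Chars.splitOn.go ['/'] fuel s cur acc
      = acc.reverse ++ (cur.reverse ++ (splitSlash s).headI) :: (splitSlash s).tail := by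
  intro s
  induction s with
  | nil =>
    intro fuel cur acc h
    cases fuel <;> simp [PySem.Chars.splitOn.go, splitSlash]
  | cons c rest ih =>
    intro fuel cur acc h
    simp only [List.length_cons] at h
    cases fuel with
    | zero => omega
    | succ fuel =>
      by_cases hc : c = '/'
      · subst hc
        simp only [PySem.Chars.splitOn.go, List.isPrefixOf]
        rw [if_pos (by simp)]
        rw [show List.drop (List.length ['/']) ('/' :: rest) = rest by simp]
        rw [ih fuel [] (cur.reverse :: acc) (by omega)]
        rcases hsr : splitSlash rest with _ | ⟨h1, t1⟩
        · exact absurd hsr (splitSlash_ne_nil rest)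
        · simp [splitSlash, hsr]
      · simp only [PySem.Chars.splitOn.go]
        rw [if_neg (by simp [List.isPrefixOf, Ne.symm hc])]
        rw [ih fuel (c :: cur) acc (by omega)]
        simp only [splitSlash, if_neg hc]
        rcases hsr : splitSlash rest with _ | ⟨h1, t1⟩
        · exact absurd hsr (splitSlash_ne_nil rest)
        · simp

lemma splitOn_eq (s : List Char) : PySem.Chars.splitOn s ['/'] = splitSlash s := by
  show PySem.Chars.splitOn.go ['/'] (s.length + 1) s [] [] = _
  rw [go_spec s (s.length + 1) [] [] (by omega)]
  rcases hs : splitSlash s with _ | ⟨a, t⟩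
  · exact absurd hs (splitSlash_ne_nil s)
  · simp

def joinSlash : List (List Char) → List Char
  | [] => []
  | [a] => a
  | a :: b :: rest => a ++ '/' :: joinSlash (b :: rest)

lemma joinSlash_cons (a : List Char) (rest : List (List Char)) (h : rest ≠ []) :
    joinSlash (a :: rest) = a ++ '/' :: joinSlash rest := by
  cases rest with
  | nil => exact absurd rfl h
  | cons b t => rfl

lemma join_splitSlash (s : List Char) : joinSlash (splitSlash s) = s := by
  induction s with
  | nil => rfl
  | cons c rest ih =>
    by_cases hc : c = '/'
    · subst hc
      rw [show splitSlash ('/' :: rest) = [] :: splitSlash rest from by simp [splitSlash]]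
      rw [joinSlash_cons _ _ (splitSlash_ne_nil rest), ih]
      rfl
    · simp only [splitSlash, if_neg hc]
      rcases hsr : splitSlash rest with _ | ⟨h1, t1⟩
      · exact absurd hsr (splitSlash_ne_nil rest)
      · rw [hsr] at ih
        simp only [List.headI, List.tail]
        cases t1 with
        | nil => simpa [joinSlash] using congrArg (c :: ·) ih
        | cons b t =>
          rw [joinSlash_cons _ _ (by simp)] at ih ⊢
          rw [← ih]; rfl

lemma joinSlash_append (xs ys : List (List Char)) (hx : xs ≠ []) (hy : ys ≠ []) :
    joinSlash (xs ++ ys) = joinSlash xs ++ '/' :: joinSlash ys := by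
  induction xs with
  | nil => exact absurd rfl hx
  | cons a t ih =>
    cases t with
    | nil =>
      simp only [List.cons_append, List.nil_append]
      rw [joinSlash_cons a ys hy]
      rfl
    | cons b t' =>
      simp only [List.cons_append]
      rw [joinSlash_cons a (b :: (t' ++ ys)) (by simp),
        show b :: (t' ++ ys) = (b :: t') ++ ys from rfl, ih (by simp),
        joinSlash_cons a (b :: t') (by simp)]
      simp

lemma splitSlash_append (a u : List Char) :
    splitSlash (a ++ '/' :: u) = splitSlash a ++ splitSlash u := by
  induction a with
  | nil => simp [splitSlash]
  | cons c rest ih =>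
    by_cases hc : c = '/'
    · subst hc; simp [splitSlash, ih]
    · simp only [List.cons_append, splitSlash, if_neg hc, ih]
      rcases hsr : splitSlash rest with _ | ⟨h1, t1⟩
      · exact absurd hsr (splitSlash_ne_nil rest)
      · simp

lemma splitSlash_injective {s t : List Char} (h : splitSlash s = splitSlash t) : s = t := by
  rw [← join_splitSlash s, ← join_splitSlash t, h]

lemma suff_to_boundary : ∀ (r : List Char) (ts : List (List Char)),
    ts <:+ splitSlash r → ts ≠ [] →
    ∃ i, (i = 0 ∨ r[i - 1]? = some '/') ∧ splitSlash (r.drop i) = ts := by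
  intro r
  induction r with
  | nil =>
    intro ts hs hne
    refine ⟨0, Or.inl rfl, ?_⟩
    rcases List.suffix_cons_iff.mp (by simpa [splitSlash] using hs) with h | h
    · simpa [splitSlash] using h.symm
    · exact absurd (List.suffix_nil.mp h) hne
  | cons c r' ih =>
    intro ts hs hne
    by_cases hc : c = '/'
    · subst hc
      rw [show splitSlash ('/' :: r') = [] :: splitSlash r' from by simp [splitSlash]] at hs
      rcases List.suffix_cons_iff.mp hs with h | h
      · exact ⟨0, Or.inl rfl, by rw [List.drop_zero, h, show splitSlash ('/' :: r') = [] :: splitSlash r' from by simp [splitSlash]]⟩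
      · obtain ⟨i', hb, hsp⟩ := ih ts h hne
        refine ⟨i' + 1, Or.inr ?_, by simpa using hsp⟩
        rcases hb with h0 | hget
        · subst h0; simp
        · cases i' with
          | zero => simp
          | succ k => simpa using hget
    · rcases hsr : splitSlash r' with _ | ⟨h1, t1⟩
      · exact absurd hsr (splitSlash_ne_nil r')
      · rw [show splitSlash (c :: r') = (c :: h1) :: t1 from by
          simp [splitSlash, if_neg hc, hsr]] at hs
        rcases List.suffix_cons_iff.mp hs with h | h
        · exact ⟨0, Or.inl rfl, by
            rw [List.drop_zero, h, show splitSlash (c :: r') = (c :: h1) :: t1 from by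
              simp [splitSlash, if_neg hc, hsr]]⟩
        · obtain ⟨i', hb, hsp⟩ := ih ts (h.trans (by rw [hsr]; exact List.suffix_cons h1 t1)) hne
          have hi' : i' ≠ 0 := by
            intro h0; subst h0
            rw [List.drop_zero, hsr] at hsp
            have hlen := h.length_le
            rw [← hsp] at hlen
            simp at hlen
          refine ⟨i' + 1, Or.inr ?_, by simpa using hsp⟩
          rcases hb with h0 | hget
          · exact absurd h0 hi'
          · cases i' with
            | zero => exact absurd rfl hi'
            | succ k => simpa using hget

lemma boundary_to_suff (r : List Char) (i : Nat)
    (hb : i = 0 ∨ r[i - 1]? = some '/') :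
    splitSlash (r.drop i) <:+ splitSlash r := by
  rcases hb with h0 | hget
  · subst h0; simp
  · cases i with
    | zero => simp
    | succ k =>
      simp only [Nat.add_sub_cancel] at hget
      have hk : k < r.length := (List.getElem?_eq_some_iff.mp hget).1
      have hr : r = r.take k ++ '/' :: r.drop (k + 1) := by
        conv_lhs => rw [← List.take_append_drop k r]
        rw [List.drop_eq_getElem_cons hk]
        simp [List.getElem?_eq_getElem hk] at hget
        rw [hget]
      rw [show splitSlash r = splitSlash (r.take k ++ '/' :: r.drop (k + 1)) from by rw [← hr],
        splitSlash_append]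
      exact List.suffix_append _ _

lemma prefix_char (nd t : List Char) :
    splitSlash nd <+: splitSlash t ↔ (t = nd ∨ ∃ u, t = nd ++ '/' :: u) := by
  constructor
  · rintro ⟨rest, hrest⟩
    cases rest with
    | nil => exact Or.inl (splitSlash_injective (by simpa using hrest.symm))
    | cons v r' =>
      refine Or.inr ⟨joinSlash (v :: r'), ?_⟩
      rw [← join_splitSlash t, ← hrest,
        joinSlash_append _ _ (splitSlash_ne_nil nd) (by simp), join_splitSlash]
  · rintro (rfl | ⟨u, rfl⟩)
    · exact List.prefix_refl _
    · rw [splitSlash_append]; exact List.prefix_append _ _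

lemma right_iff (r nd : List Char) (i : Nat) (hnd : nd ≠ []) :
    (nd <+: r.drop i ∧ (i + nd.length = r.length ∨ r[i + nd.length]? = some '/')) ↔
    (r.drop i = nd ∨ ∃ u, r.drop i = nd ++ '/' :: u) := by
  constructor
  · rintro ⟨⟨rest, hrest⟩, hb⟩
    have hi : i < r.length := by
      by_contra hle
      rw [List.drop_eq_nil_iff.mpr (by omega)] at hrest
      exact hnd (by cases nd <;> simp_all)
    have hlen : r.length - i = nd.length + rest.length := by
      have := congrArg List.length hrest
      simpa using this.symm
    rcases hb with h1 | h2
    · have hr0 : rest.length = 0 := by omega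
      have : rest = [] := List.length_eq_zero_iff.mp hr0
      subst this; exact Or.inl (by simpa using hrest.symm)
    · have : rest[0]? = some '/' := by
        rw [← List.getElem?_drop] at h2
        rw [← hrest] at h2
        simpa [List.getElem?_append_right (Nat.le_refl nd.length)] using h2
      rcases rest with _ | ⟨v, u⟩
      · simp at this
      · simp at this
        subst this
        exact Or.inr ⟨u, hrest.symm⟩
  · rintro (heq | ⟨u, heq⟩)
    · refine ⟨heq ▸ List.prefix_refl _, Or.inl ?_⟩
      have hlen := congrArg List.length heq
      simp at hlen
      have : ¬ r.length < i := by
        intro hlt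
        rw [List.drop_eq_nil_iff.mpr (by omega)] at heq
        exact hnd heq.symm
      omega
    · refine ⟨⟨'/' :: u, heq.symm ▸ rfl⟩, Or.inr ?_⟩
      rw [← List.getElem?_drop, heq, List.getElem?_append_right (Nat.le_refl nd.length)]
      simp

lemma PBCond_iff_infix (r nd : List Char) (hnd : nd ≠ []) :
    (∃ i, PBCond r nd i) ↔ splitSlash nd <:+: splitSlash r := by
  constructor
  · rintro ⟨i, hl, hp, hr⟩
    have h1 : splitSlash nd <+: splitSlash (r.drop i) :=
      (prefix_char nd (r.drop i)).mpr ((right_iff r nd i hnd).mp ⟨hp, hr⟩)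
    exact h1.isInfix.trans (boundary_to_suff r i hl).isInfix
  · rintro ⟨s, t, hst⟩
    have hsuf : (splitSlash nd ++ t) <:+ splitSlash r := ⟨s, by rw [← hst]; simp⟩
    obtain ⟨i, hb, hsp⟩ := suff_to_boundary r (splitSlash nd ++ t) hsuf
      (by have := splitSlash_ne_nil nd; cases hnds : splitSlash nd <;> simp_all)
    have hpre : splitSlash nd <+: splitSlash (r.drop i) := ⟨t, by rw [hsp]⟩
    obtain ⟨hp, hr⟩ := (right_iff r nd i hnd).mpr ((prefix_char nd (r.drop i)).mp hpre)
    exact ⟨i, hb, hp, hr⟩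

-- B's sliding-window any over pyRange decides contiguous-sublist containment
lemma any_slice_iff (comps nc : List (List Char)) (hnc : nc ≠ []) :
    ((PySem.List.pyRange 0 ((comps.length : Int) - (nc.length : Int) + 1) 1).any fun j =>
      decide (PySem.List.slice comps (some j) (some (j + (nc.length : Int))) = nc)) = true
    ↔ nc <:+: comps := by
  simp only [List.any_eq_true, PySem.List.mem_pyRange_one, decide_eq_true_eq]
  constructor
  · rintro ⟨j, ⟨hj0, hjlt⟩, hsl⟩
    obtain ⟨k, rfl⟩ : ∃ k : Nat, j = (k : Int) := ⟨j.toNat, (Int.toNat_of_nonneg hj0).symm⟩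
    rw [PySem.List.slice_natCast_add] at hsl
    have hpre : nc <+: comps.drop k := hsl ▸ List.take_prefix _ _
    exact hpre.isInfix.trans (List.drop_suffix k comps).isInfix
  · rintro ⟨s, t, hst⟩
    refine ⟨(s.length : Int), ⟨Int.natCast_nonneg _, ?_⟩, ?_⟩
    · have hle : s.length + nc.length ≤ comps.length := by
        rw [← hst]; simp
      omega
    · rw [PySem.List.slice_natCast_add, ← hst, List.append_assoc, List.drop_left,
        List.take_left]

-- ===== VERDICT (by name: the statement is the Claim_ definition above) =====
theorem path_boundary_match_py_spec : Claim_equal_path_boundary_match_py := by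
  intro relpath needle _ hpre
  obtain ⟨hn, hr⟩ := hpre
  have hn' : PySem.Chars.startswith needle.toList ['/'] = true := by simpa using hn
  have hnd : needle.toList ≠ [] := by
    have h := (PySem.Chars.startswith_iff needle.toList ['/']).mp hn'
    intro he; rw [he] at h
    simpa using List.prefix_nil.mp h
  unfold Spec_path_boundary_match_py path_boundary_match_py path_boundary_match_py_alt
  have g1 : ¬¬(PySem.Str.startswith needle "/" = true) := not_not_intro hn
  have g2 : ¬¬(PySem.Str.startswith relpath "/" = true) := not_not_intro hr
  rw [if_neg g1, if_neg g2, if_neg g1, if_neg g2]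
  simp only [splitOn_eq]
  rw [Bool.eq_iff_iff,
    any_slice_iff (splitSlash relpath.toList) (splitSlash needle.toList) (splitSlash_ne_nil _),
    ← PBCond_iff_infix relpath.toList needle.toList hnd]
  by_cases hfast : relpath.toList = needle.toList ∨ needle.toList ++ ['/'] <+: relpath.toList
  · have hcond : (decide (relpath.toList = needle.toList) ||
        PySem.Chars.startswith relpath.toList (needle.toList ++ ['/'])) = true := by
      rcases hfast with h | h
      · simp [h]
      · simp [PySem.Chars.startswith_iff, h]
    rw [if_pos hcond]
    exact iff_of_true rfl ⟨0, fast_path_cond hfast⟩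
  · have hcond : ¬ ((decide (relpath.toList = needle.toList) ||
        PySem.Chars.startswith relpath.toList (needle.toList ++ ['/'])) = true) := by
      simp only [Bool.or_eq_true, decide_eq_true_eq, PySem.Chars.startswith_iff]
      exact hfast
    rw [if_neg hcond,
      pathFindLoop_iff relpath.toList needle.toList hnd _ 0 (by omega) (by omega)]
    constructor
    · rintro ⟨i, -, hc⟩; exact ⟨i, hc⟩
    · rintro ⟨i, hc⟩; exact ⟨i, Nat.zero_le _, hc⟩
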